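-- pv_equiv track=rewrite | github.com/fuzzy-dynamics/putnam-2025 | rough/A5_verify.py | compute_f
-- ===== SOURCE A (Python) =====
-- from itertools import permutations, product
--
-- def compute_f(n, s):
--     """Compute f(s) by direct enumeration."""
--     if n <= 1:
--         return 1
--     if len(s) == 0:
--         return 1
--     count = 0
--     for perm in permutations(range(1, n+1)):
--         valid = True
--         for i in range(len(s)):
--             if s[i] * (perm[i+1] - perm[i]) <= 0:
--                 valid = False
--                 break
--         if valid:
--             count += 1
--     return count
-- ===== SOURCE B (Python) =====
-- def compute_f(n, s):
--     """DP over positions processed right-to-left: dp[a] = number of ways to lay out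
--     a remaining smaller and (len(dp)-1-a) remaining larger values matching the
--     remaining sign pattern; each sign step is a prefix/suffix-sum pass."""
--     if n <= 1 or not s:
--         return 1
--     L = len(s)
--     if L > n - 1:
--         return 0
--     f = 1
--     for k in range(2, n - L):
--         f *= k
--     dp = [f] * (n - L)          # pattern consumed: dp[a] = (n-1-L)! free arrangements
--     for sign in reversed(s):
--         if sign == 0:
--             return 0            # no two distinct values are equal: zero sign is unsatisfiable
--         acc, new = 0, [0]
--         for v in (reversed(dp) if sign > 0 else dp):
--             acc += v
--             new.append(acc)
--         if sign > 0:
--             new.reverse()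
--         dp = new
--     return sum(dp)
-- ===== Notes on version B (the rewrite author's own statement) =====
-- stated objective: alternative
-- what changed: Replaces brute-force enumeration of all n! permutations with an exact dynamic program processed over the sign pattern right-to-left, where dp[a] counts layouts of a remaining-smaller and (len(dp)-1-a) remaining-larger values and each sign step is a prefix/suffix-sum pass.
-- outside the precondition, e.g. on compute_f(2, [0, 1]): A returns 0, B returns 0
import Mathlib
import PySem

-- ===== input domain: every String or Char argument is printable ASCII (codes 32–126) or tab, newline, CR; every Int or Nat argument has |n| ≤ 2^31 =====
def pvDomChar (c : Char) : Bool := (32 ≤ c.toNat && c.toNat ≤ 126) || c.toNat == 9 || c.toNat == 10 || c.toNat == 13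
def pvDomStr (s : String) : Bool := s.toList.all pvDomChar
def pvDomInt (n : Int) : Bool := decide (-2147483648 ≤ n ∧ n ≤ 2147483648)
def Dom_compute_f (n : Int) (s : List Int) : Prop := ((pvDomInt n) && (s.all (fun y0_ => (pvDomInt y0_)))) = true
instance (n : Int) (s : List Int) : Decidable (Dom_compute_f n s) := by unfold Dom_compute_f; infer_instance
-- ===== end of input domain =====

-- B replaces A's exhaustive permutation enumeration by a rank-counting dynamic program
-- over the sign pattern (prefix/suffix-sum passes); same return value on Pre_.


-- ===== PORT A =====
-- inner loop 'for i in range(len(s)): if s[i]*(perm[i+1]-perm[i]) <= 0: valid=False; break'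
-- (pyGetD is exact here: Pre_ guarantees both indices are in range on every reached i)
def checkA (s perm : List Int) (i : Nat) : Bool :=
  if h : i < s.length then
    if s[i] * (PySem.List.pyGetD perm ((i : Nat) + 1 : Int) 0 - PySem.List.pyGetD perm (i : Int) 0) ≤ 0 then
      false
    else
      checkA s perm (i + 1)
  else
    true
termination_by s.length - i


def compute_f (n : Int) (s : List Int) : Int :=
  if n ≤ 1 then 1
  else if s.length = 0 then 1
  else
    (PySem.List.permutations (PySem.List.pyRange 1 (n + 1) 1)
        (PySem.List.pyRange 1 (n + 1) 1).length).foldl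
      (fun count perm => if checkA s perm 0 then count + 1 else count) 0

-- ===== PORT B =====
-- 'acc, new = 0, [0]; for v in xs: acc += v; new.append(acc)' — returns (acc, new)
def bScan (xs : List Int) : Int × List Int :=
  xs.foldl (fun st v => (st.1 + v, st.2 ++ [st.1 + v])) (0, [0])

def bLoop : List Int → List Int → Option (List Int)
  | [], dp => some dp
  | sign :: rest, dp =>
    if sign = 0 then none
    else if sign > 0 then bLoop rest ((bScan dp.reverse).2).reverse
    else bLoop rest (bScan dp).2



-- 'for sign in reversed(s): …' with the early 'return 0' modelled as none


def compute_f_alt (n : Int) (s : List Int) : Int :=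
  if n ≤ 1 ∨ s = [] then 1
  else if (s.length : Int) > n - 1 then 0
  else
    let f := (PySem.List.pyRange 2 (n - s.length) 1).foldl (fun a k => a * k) 1
    let dp := List.replicate (n - (s.length : Int)).toNat f
    match bLoop s.reverse dp with
    | none => 0
    | some dp => dp.sum

-- ===== PRECONDITION & SPEC =====
-- Pre_ excludes patterns longer than n-1 when n ≥ 2: there A indexes perm[n] and raises
-- IndexError whenever some permutation survives the prefix checks (only an early zero sign
-- prevents the raise, and then A returns the same 0 that B returns).
def Pre_compute_f (n : Int) (s : List Int) : Prop :=
  n ≤ 1 ∨ s = [] ∨ (s.length : Int) + 1 ≤ n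
instance (n : Int) (s : List Int) : Decidable (Pre_compute_f n s) := by
  unfold Pre_compute_f; infer_instance
def pvWitness_compute_f : Int × List Int := (3, [1, -1])

def Spec_compute_f (n : Int) (s : List Int) (out : Int) : Prop := out = compute_f_alt n s
instance (n : Int) (s : List Int) (out : Int) : Decidable (Spec_compute_f n s out) := by
  unfold Spec_compute_f; infer_instance

-- ===== CLAIM (what is proved, stated in full; the proofs are below) =====
def Claim_equal_compute_f : Prop := ∀ (n : Int) (s : List Int), Dom_compute_f n s → Pre_compute_f n s → Spec_compute_f n s (compute_f n s)
-- ===== LEMMAS AND PROOFS =====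

theorem not_mem_eraseIdx' {l : List Int} (hx : l.Nodup) {i : Nat} (h : i < l.length) :
    l[i] ∉ l.eraseIdx i := by
  intro hmem
  rw [List.mem_eraseIdx_iff_getElem] at hmem
  obtain ⟨j, hj, hne, hEq⟩ := hmem
  exact hne ((List.Nodup.getElem_inj_iff hx).1 hEq)

theorem countP_eraseIdx' (p : Int → Bool) (l : List Int) {i : Nat} (h : i < l.length) :
    (l.eraseIdx i).countP p + (if p l[i] then 1 else 0) = l.countP p := by
  conv_rhs => rw [show l = l.take i ++ l[i] :: l.drop (i+1) by
    rw [← List.drop_eq_getElem_cons h, List.take_append_drop]]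
  rw [List.eraseIdx_eq_take_drop_succ, List.countP_append, List.countP_append, List.countP_cons]
  omega

theorem countP_flatMap' {α β : Type} (l : List α) (f : α → List β) (p : β → Bool) :
    (l.flatMap f).countP p = (l.map (fun a => (f a).countP p)).sum := by
  induction l with
  | nil => simp
  | cons x t ih => simp [List.countP_append, ih]

theorem cnt_partition {x : Int} (t : List Int) (hx : x ∉ t) :
    t.countP (fun y => y < x) + t.countP (fun y => x < y) = t.length := by
  induction t with
  | nil => simp
  | cons y r ih =>
    simp only [List.countP_cons, List.length_cons, List.mem_cons, not_or] at *
    have h1 := ih hx.2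
    have : y ≠ x := fun h => hx.1 h.symm
    rcases lt_trichotomy y x with h | h | h
    · simp [h, not_lt.2 (le_of_lt h)]; omega
    · subst h; simp at hx
    · simp [h, not_lt.2 (le_of_lt h)]; omega

theorem cnt_rank {x : Int} {ys : List Int} (hnd : ys.Nodup) (hx : x ∈ ys) :
    ys.countP (fun y => y < x) + ys.countP (fun y => x < y) + 1 = ys.length := by
  induction ys with
  | nil => simp at hx
  | cons y r ih =>
    simp only [List.countP_cons, List.length_cons]
    rcases List.mem_cons.1 hx with rfl | hxr
    · have hxr : x ∉ r := (List.nodup_cons.1 hnd).1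
      have := cnt_partition r hxr
      simp; omega
    · have hnd' := (List.nodup_cons.1 hnd).2
      have hyx : y ≠ x := fun h => (List.nodup_cons.1 hnd).1 (h ▸ hxr)
      have := ih hnd' hxr
      rcases lt_trichotomy y x with h | h | h
      · simp [h, not_lt.2 (le_of_lt h)]; omega
      · exact absurd h hyx
      · simp [h, not_lt.2 (le_of_lt h)]; omega

-- rank lemma, sorted case
theorem rank_sum_sorted :
    ∀ (ys : List Int), ys.Pairwise (· < ·) → ∀ (F : Nat → Nat),
      (ys.map (fun x => F (ys.countP (fun y => y < x)))).sum = ((List.range ys.length).map F).sum := by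
  intro ys
  induction ys with
  | nil => simp
  | cons y t ih =>
    intro hp F
    have hyt := (List.pairwise_cons.1 hp).1
    have hpt := (List.pairwise_cons.1 hp).2
    have h0 : (y :: t).countP (fun z => z < y) = 0 := by
      apply List.countP_eq_zero.2
      intro z hz
      rcases List.mem_cons.1 hz with rfl | hz
      · simp
      · simp [not_lt.2 (le_of_lt (hyt z hz))]
    have hcnt : ∀ x ∈ t, (y :: t).countP (fun z => z < x) = t.countP (fun z => z < x) + 1 := by
      intro x hx
      rw [List.countP_cons]
      simp [hyt x hx]
    simp only [List.map_cons, List.sum_cons, h0]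
    have heq : (t.map (fun x => F ((y :: t).countP fun z => z < x))).sum
        = (t.map (fun x => (fun j => F (j + 1)) (t.countP fun z => z < x))).sum := by
      apply congrArg
      apply List.map_congr_left
      intro x hx
      rw [hcnt x hx]
    rw [heq, ih hpt (fun j => F (j+1))]
    rw [List.length_cons, List.range_succ_eq_map]
    simp only [List.map_cons, List.sum_cons, List.map_map]
    rfl

-- rank lemma: nodup version via sorting
theorem rank_sum {ys : List Int} (hnd : ys.Nodup) (F : Nat → Nat) :
    (ys.map (fun x => F (ys.countP (fun y => y < x)))).sum = ((List.range ys.length).map F).sum := by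
  set zs := ys.mergeSort (fun a b => decide (a ≤ b)) with hz
  have hperm : zs.Perm ys := List.mergeSort_perm ys _
  have hnd' : zs.Nodup := hperm.nodup_iff.2 hnd
  have hsorted : zs.Pairwise (· < ·) := by
    have hle : zs.Pairwise (fun a b => a ≤ b) := by
      have := List.pairwise_mergeSort (le := fun a b : Int => decide (a ≤ b)) ?_ ?_ ys
      · exact this.imp (by intro a b h; exact of_decide_eq_true h)
      · intro a b c h1 h2; simp at *; omega
      · intro a b; simp; omega
    exact (hle.and hnd').imp (fun h => lt_of_le_of_ne h.1 h.2)
  have hcnt : ∀ x, zs.countP (fun y => y < x) = ys.countP (fun y => y < x) :=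
    fun x => hperm.countP_eq _
  calc (ys.map (fun x => F (ys.countP (fun y => y < x)))).sum
      = (zs.map (fun x => F (ys.countP (fun y => y < x)))).sum :=
        ((hperm.map _).sum_eq).symm
    _ = (zs.map (fun x => F (zs.countP (fun y => y < x)))).sum := by
        simp only [hcnt]
    _ = ((List.range zs.length).map F).sum := rank_sum_sorted zs hsorted F
    _ = ((List.range ys.length).map F).sum := by rw [hperm.length_eq]

theorem permsLen : ∀ (k : Nat) (xs : List Int), xs.length = k →
    (PySem.List.permutations xs k).length = k.factorial := by
  intro k
  induction k with
  | zero => intro xs h; rw [PySem.List.permutations_zero]; rfl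
  | succ m ih =>
    intro xs h
    rw [PySem.List.permutations_succ, List.length_flatMap]
    trans ((List.range xs.length).map (fun _ => m.factorial)).sum
    · apply congrArg List.sum
      apply List.map_congr_left
      intro i hi
      have hi' : i < xs.length := List.mem_range.1 hi
      rw [List.getElem?_eq_getElem hi']
      simp only [List.length_map]
      exact ih (xs.eraseIdx i) (by rw [List.length_eraseIdx_of_lt hi']; omega)
    · simp [h, Nat.factorial_succ, Nat.mul_comm]

def chk : List Int → Int → List Int → Bool
  | [], _, _ => true
  | _ :: _, _, [] => false
  | σ :: s', prev, x :: p => (decide (σ * (x - prev) > 0)) && chk s' x p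

def gsp : List Int → Nat → Nat → Nat
  | [], a, b => (a + b).factorial
  | σ :: s', a, b =>
    if σ > 0 then ((List.range b).map (fun j => gsp s' (a + j) (b - 1 - j))).sum
    else if σ < 0 then ((List.range a).map (fun j => gsp s' j (a - 1 - j + b))).sum
    else 0

theorem map_range_getD {α β : Type} : ∀ (xs : List α) (G : α → β) (d : α),
    (List.range xs.length).map (fun i => G (xs.getD i d)) = xs.map G := by
  intro xs
  induction xs with
  | nil => simp
  | cons x t ih =>
    intro G d
    rw [List.length_cons, List.range_succ_eq_map, List.map_cons, List.map_map]
    simp only [List.getD_cons_zero, List.map_cons]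
    congr 1
    have : ((fun i => G ((x :: t).getD i d)) ∘ Nat.succ) = fun i => G (t.getD i d) := by
      funext i; rfl
    rw [this, ih]

theorem sum_map_ite_filter {α : Type} (p : α → Bool) (F : α → Nat) : ∀ (xs : List α),
    (xs.map (fun x => if p x then F x else 0)).sum = ((xs.filter p).map F).sum := by
  intro xs
  induction xs with
  | nil => simp
  | cons x t ih =>
    by_cases h : p x <;> simp [h, ih]

theorem cnt_split_lt {prev x : Int} : ∀ (xs : List Int), prev ∉ xs → prev < x →
    xs.countP (fun y => y < x)
      = xs.countP (fun y => y < prev) + (xs.filter (fun y => prev < y)).countP (fun y => y < x) := by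
  intro xs
  induction xs with
  | nil => simp
  | cons z t ih =>
    intro hm hx
    have hm' : prev ∉ t := fun h => hm (List.mem_cons_of_mem _ h)
    have hzp : z ≠ prev := fun h => hm (h ▸ List.mem_cons_self)
    have := ih hm' hx
    rw [List.filter_cons]
    rcases lt_trichotomy z prev with h | h | h
    · simp [h, lt_trans h hx, not_lt.2 (le_of_lt h)]; omega
    · exact absurd h hzp
    · by_cases h2 : z < x <;>
        simp [h, h2, not_lt.2 (le_of_lt h)] <;> omega

theorem cnt_split_gt {prev x : Int} : ∀ (xs : List Int), prev ∉ xs → x < prev →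
    xs.countP (fun y => x < y)
      = (xs.filter (fun y => y < prev)).countP (fun y => x < y) + xs.countP (fun y => prev < y) := by
  intro xs
  induction xs with
  | nil => simp
  | cons z t ih =>
    intro hm hx
    have hm' : prev ∉ t := fun h => hm (List.mem_cons_of_mem _ h)
    have hzp : z ≠ prev := fun h => hm (h ▸ List.mem_cons_self)
    have := ih hm' hx
    rw [List.filter_cons]
    rcases lt_trichotomy z prev with h | h | h
    · by_cases h2 : x < z <;>
        simp [h, h2, not_lt.2 (le_of_lt h)] <;> omega
    · exact absurd h hzp
    · simp [h, lt_trans hx h, not_lt.2 (le_of_lt h)]; omega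

theorem ML : ∀ (s : List Int) (prev : Int) (xs : List Int), xs.Nodup → prev ∉ xs →
    (PySem.List.permutations xs xs.length).countP (fun p => chk s prev p)
      = gsp s (xs.countP (fun y => y < prev)) (xs.countP (fun y => prev < y)) := by
  intro s
  induction s with
  | nil =>
    intro prev xs hnd hm
    have h1 : (fun p : List Int => chk [] prev p) = fun _ => true := by funext p; rfl
    rw [h1, List.countP_true, permsLen xs.length xs rfl]
    show _ = gsp [] _ _
    unfold gsp
    rw [cnt_partition xs hm]
  | cons σ s' ih =>
    intro prev xs hnd hm
    match hxs : xs with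
    | [] =>
      show (PySem.List.permutations [] 0).countP _ = _
      rw [PySem.List.permutations_zero]
      unfold gsp
      simp [chk]
    | z :: t =>
      obtain ⟨m, hm1⟩ : ∃ m, (z :: t).length = m + 1 := ⟨t.length, by simp⟩
      set ws := z :: t with hws
      rw [hm1, PySem.List.permutations_succ, countP_flatMap']
      set a := ws.countP (fun y => y < prev) with ha
      set b := ws.countP (fun y => prev < y) with hb
      trans ((List.range ws.length).map (fun i =>
        if decide (σ * (ws.getD i 0 - prev) > 0)
          then gsp s' (ws.countP (fun y => y < ws.getD i 0)) (ws.countP (fun y => ws.getD i 0 < y))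
          else 0)).sum
      · apply congrArg List.sum
        apply List.map_congr_left
        intro i hi
        show _ = if decide (σ * (ws.getD i 0 - prev) > 0)
          then gsp s' (ws.countP (fun y => y < ws.getD i 0)) (ws.countP (fun y => ws.getD i 0 < y))
          else 0
        have hi' : i < ws.length := List.mem_range.1 hi
        rw [List.getElem?_eq_getElem hi']
        rw [List.countP_map]
        have hx : ws.getD i 0 = ws[i] := List.getD_eq_getElem ws 0 hi'
        rw [hx]
        have hcomp : ((fun p => chk (σ :: s') prev p) ∘ (fun p => ws[i] :: p))
            = fun p => (decide (σ * (ws[i] - prev) > 0)) && chk s' ws[i] p := by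
          funext p; rfl
        rw [hcomp]
        by_cases hc : σ * (ws[i] - prev) > 0
        · simp only [hc, decide_true, Bool.true_and]
          have hnd' : (ws.eraseIdx i).Nodup := List.Nodup.eraseIdx i hnd
          have hmem' : ws[i] ∉ ws.eraseIdx i := not_mem_eraseIdx' hnd hi'
          have hlen' : (ws.eraseIdx i).length = m := by
            rw [List.length_eraseIdx_of_lt hi']; omega
          have hih := ih ws[i] (ws.eraseIdx i) hnd' hmem'
          rw [hlen'] at hih
          rw [hih]
          have e1 : (ws.eraseIdx i).countP (fun y => y < ws[i]) = ws.countP (fun y => y < ws[i]) := by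
            have := countP_eraseIdx' (fun y => y < ws[i]) ws hi'
            simp at this; omega
          have e2 : (ws.eraseIdx i).countP (fun y => ws[i] < y) = ws.countP (fun y => ws[i] < y) := by
            have := countP_eraseIdx' (fun y => ws[i] < y) ws hi'
            simp at this; omega
          rw [e1, e2]
          simp
        · simp only [hc, decide_false, Bool.false_and]
          simp
      rw [map_range_getD ws (fun x =>
        if decide (σ * (x - prev) > 0)
          then gsp s' (ws.countP (fun y => y < x)) (ws.countP (fun y => x < y))
          else 0) 0]
      rcases lt_trichotomy σ 0 with hσ | hσ | hσ
      · -- σ < 0 : descent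
        have hcond : ∀ x ∈ ws, (if decide (σ * (x - prev) > 0)
              then gsp s' (ws.countP (fun y => y < x)) (ws.countP (fun y => x < y)) else 0)
            = (if decide (x < prev)
              then gsp s' (ws.countP (fun y => y < x)) (ws.countP (fun y => x < y)) else 0) := by
          intro x _
          congr 1
          rcases lt_trichotomy x prev with h | h | h
          · simp [h, mul_pos_of_neg_of_neg hσ (by omega : x - prev < 0)]
          · subst h; simp
          · have hneg := mul_neg_of_neg_of_pos hσ (by omega : (0:Int) < x - prev)
            simp [not_lt.2 (le_of_lt hneg), not_lt.2 (le_of_lt h)]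
        rw [List.map_congr_left hcond,
            sum_map_ite_filter (fun x => decide (x < prev))
              (fun x => gsp s' (ws.countP (fun y => y < x)) (ws.countP (fun y => x < y))) ws]
        set ys := ws.filter (fun y => decide (y < prev)) with hys
        have hlys : ys.length = a := (List.countP_eq_length_filter ..).symm
        have hndys : ys.Nodup := List.Nodup.filter _ hnd
        have hinner : ∀ x ∈ ys,
            gsp s' (ws.countP (fun y => y < x)) (ws.countP (fun y => x < y))
              = (fun j => gsp s' j (a - 1 - j + b)) (ys.countP (fun y => y < x)) := by
          intro x hxm
          have hxw : x ∈ ws := List.mem_of_mem_filter hxm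
          have hxp : x < prev := by
            have := List.of_mem_filter hxm; simpa using this
          have e1 : ws.countP (fun y => y < x) = ys.countP (fun y => y < x) := by
            rw [hys, List.countP_filter]
            apply List.countP_congr
            intro y _
            by_cases h : y < x <;> simp [h]
            · exact lt_trans h hxp
          have e2 : ws.countP (fun y => x < y) = ys.countP (fun y => x < y) + b := by
            rw [hb]
            exact cnt_split_gt ws hm hxp
          have e3 : ys.countP (fun y => x < y) = ys.length - 1 - ys.countP (fun y => y < x) := by
            have := cnt_rank hndys hxm; omega
          rw [e1, e2, e3, hlys]
        rw [List.map_congr_left hinner,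
            rank_sum hndys (fun j => gsp s' j (a - 1 - j + b)), hlys]
        show _ = gsp (σ :: s') a b
        rw [gsp]
        rw [if_neg (by omega), if_pos (by omega)]
      · -- σ = 0
        subst hσ
        have h0 : ∀ x ∈ ws, (if decide (0 * (x - prev) > 0)
              then gsp s' (ws.countP (fun y => y < x)) (ws.countP (fun y => x < y)) else 0) = 0 := by
          intro x _; simp
        rw [List.map_congr_left h0]
        show _ = gsp (0 :: s') a b
        rw [gsp]
        simp
      · -- σ > 0 : ascent
        have hcond : ∀ x ∈ ws, (if decide (σ * (x - prev) > 0)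
              then gsp s' (ws.countP (fun y => y < x)) (ws.countP (fun y => x < y)) else 0)
            = (if decide (prev < x)
              then gsp s' (ws.countP (fun y => y < x)) (ws.countP (fun y => x < y)) else 0) := by
          intro x _
          congr 1
          rcases lt_trichotomy prev x with h | h | h
          · simp [h, mul_pos hσ (by omega : (0:Int) < x - prev)]
          · subst h; simp
          · have hneg := mul_neg_of_pos_of_neg hσ (by omega : x - prev < 0)
            simp [not_lt.2 (le_of_lt hneg), not_lt.2 (le_of_lt h)]
        rw [List.map_congr_left hcond,
            sum_map_ite_filter (fun x => decide (prev < x))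
              (fun x => gsp s' (ws.countP (fun y => y < x)) (ws.countP (fun y => x < y))) ws]
        set ys := ws.filter (fun y => decide (prev < y)) with hys
        have hlys : ys.length = b := (List.countP_eq_length_filter ..).symm
        have hndys : ys.Nodup := List.Nodup.filter _ hnd
        have hinner : ∀ x ∈ ys,
            gsp s' (ws.countP (fun y => y < x)) (ws.countP (fun y => x < y))
              = (fun j => gsp s' (a + j) (b - 1 - j)) (ys.countP (fun y => y < x)) := by
          intro x hxm
          have hxw : x ∈ ws := List.mem_of_mem_filter hxm
          have hxp : prev < x := by
            have := List.of_mem_filter hxm; simpa using this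
          have e1 : ws.countP (fun y => y < x) = a + ys.countP (fun y => y < x) := by
            rw [ha]
            exact cnt_split_lt ws hm hxp
          have e2 : ws.countP (fun y => x < y) = ys.countP (fun y => x < y) := by
            rw [hys, List.countP_filter]
            apply List.countP_congr
            intro y _
            by_cases h : x < y <;> simp [h]
            · exact lt_trans hxp h
          have e3 : ys.countP (fun y => x < y) = ys.length - 1 - ys.countP (fun y => y < x) := by
            have := cnt_rank hndys hxm; omega
          rw [e1, e2, e3, hlys]
        rw [List.map_congr_left hinner,
            rank_sum hndys (fun j => gsp s' (a + j) (b - 1 - j)), hlys]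
        show _ = gsp (σ :: s') a b
        rw [gsp]
        rw [if_pos (by omega)]

theorem checkA_eq : ∀ (k : Nat) (s perm : List Int) (i : Nat), s.length - i = k →
    s.length < perm.length →
    checkA s perm i = chk (s.drop i) (perm.getD i 0) (perm.drop (i + 1)) := by
  intro k
  induction k with
  | zero =>
    intro s perm i hk hl
    rw [checkA, dif_neg (by omega)]
    rw [List.drop_eq_nil_of_le (by omega)]
    rfl
  | succ r ihr =>
    intro s perm i hk hl
    have hi : i < s.length := by omega
    have hip : i < perm.length := by omega
    have hip1 : i + 1 < perm.length := by omega
    rw [checkA, dif_pos hi]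
    rw [List.drop_eq_getElem_cons hi, List.drop_eq_getElem_cons hip1]
    have hg1 : PySem.List.pyGetD perm ((i : Nat) + 1 : Int) 0 = perm[i + 1] := by
      have : ((i : Nat) + 1 : Int) = ((i + 1 : Nat) : Int) := by push_cast; ring
      rw [this, PySem.List.pyGetD_natCast, List.getD_eq_getElem _ _ hip1]
    have hg0 : PySem.List.pyGetD perm ((i : Nat) : Int) 0 = perm[i] := by
      rw [PySem.List.pyGetD_natCast, List.getD_eq_getElem _ _ hip]
    have hgd : perm.getD i 0 = perm[i] := List.getD_eq_getElem _ _ hip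
    rw [hg1, hg0, hgd, chk]
    by_cases hc : s[i] * (perm[i+1] - perm[i]) ≤ 0
    · rw [if_pos hc]
      have : decide (s[i] * (perm[i+1] - perm[i]) > 0) = false := by
        simp; omega
      rw [this, Bool.false_and]
    · rw [if_neg hc]
      have h2 : decide (s[i] * (perm[i+1] - perm[i]) > 0) = true := by
        simp; omega
      rw [h2, Bool.true_and]
      have := ihr s perm (i + 1) (by omega) hl
      rw [this, List.getD_eq_getElem _ _ hip1]

theorem gsp_zero : ∀ (s : List Int) (a b : Nat), (0 : Int) ∈ s → gsp s a b = 0 := by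
  intro s
  induction s with
  | nil => intro a b h; simp at h
  | cons σ s' ih =>
    intro a b h
    rw [gsp]
    rcases List.mem_cons.1 h with rfl | h'
    · rw [if_neg (by omega), if_neg (by omega)]
    · split_ifs <;> try rfl
      · apply List.sum_eq_zero
        intro x hx
        obtain ⟨j, _, rfl⟩ := List.mem_map.1 hx
        exact ih _ _ h'
      · apply List.sum_eq_zero
        intro x hx
        obtain ⟨j, _, rfl⟩ := List.mem_map.1 hx
        exact ih _ _ h'

def dpOf (w : List Int) (M : Nat) : List Int :=
  (List.range M).map (fun a => ((gsp w a (M - 1 - a) : Nat) : Int))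

theorem bScan_general : ∀ (xs : List Int) (c : Int) (ys : List Int),
    xs.foldl (fun st v => (st.1 + v, st.2 ++ [st.1 + v])) (c, ys)
      = (c + xs.sum, ys ++ (List.range xs.length).map (fun k => c + (xs.take (k + 1)).sum)) := by
  intro xs
  induction xs with
  | nil => intro c ys; simp
  | cons x t ih =>
    intro c ys
    rw [List.foldl_cons, ih]
    refine Prod.ext ?_ ?_
    · show c + x + t.sum = c + (x :: t).sum
      rw [List.sum_cons]; ring
    · show ys ++ [c + x] ++ (List.range t.length).map (fun k => c + x + (t.take (k + 1)).sum)
        = ys ++ (List.range (x :: t).length).map (fun k => c + ((x :: t).take (k + 1)).sum)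
      rw [List.length_cons, List.range_succ_eq_map, List.map_cons, List.map_map, List.append_assoc]
      congr 1
      rw [List.take_succ_cons, List.take_zero, List.sum_cons, List.sum_nil,
          List.singleton_append]
      congr 1
      · ring
      · apply List.map_congr_left
        intro k _
        show c + x + (t.take (k + 1)).sum = c + ((x :: t).take (k + 1 + 1)).sum
        rw [List.take_succ_cons, List.sum_cons]
        ring

theorem bScan_snd (xs : List Int) :
    (bScan xs).2 = 0 :: (List.range xs.length).map (fun k => (xs.take (k + 1)).sum) := by
  show (xs.foldl _ (0, [0])).2 = _
  rw [bScan_general]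
  show [(0 : Int)] ++ _ = _
  rw [List.singleton_append]
  congr 1
  apply List.map_congr_left
  intro k _
  rw [zero_add]

theorem take_dpOf (v : List Int) (M k : Nat) (h : k ≤ M) :
    (dpOf v M).take k = (List.range k).map (fun a => ((gsp v a (M - 1 - a) : Nat) : Int)) := by
  rw [dpOf, ← List.map_take, List.take_range, Nat.min_eq_left h]

theorem drop_range' (a M : Nat) (h : a ≤ M) :
    List.drop a (List.range M) = (List.range (M - a)).map (fun x => a + x) := by
  conv_lhs => rw [show M = a + (M - a) by omega]
  rw [List.range_add]
  simp

theorem drop_dpOf (v : List Int) (M a : Nat) (h : a ≤ M) :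
    (dpOf v M).drop a = (List.range (M - a)).map (fun j => ((gsp v (a + j) (M - 1 - (a + j)) : Nat) : Int)) := by
  rw [dpOf, ← List.map_drop, drop_range' a M h, List.map_map]
  rfl

theorem length_dpOf (v : List Int) (M : Nat) : (dpOf v M).length = M := by
  rw [dpOf, List.length_map, List.length_range]

theorem getElem_dpOf (w : List Int) (M i : Nat) (h : i < M) :
    (dpOf w M)[i]'(by rw [length_dpOf]; exact h) = ((gsp w i (M - 1 - i) : Nat) : Int) := by
  simp only [dpOf]
  rw [List.getElem_map (h := by simp; omega), List.getElem_range]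

theorem SLdown {σ : Int} (hσ : σ < 0) (v : List Int) (M : Nat) :
    (bScan (dpOf v M)).2 = dpOf (σ :: v) (M + 1) := by
  rw [bScan_snd, length_dpOf]
  apply List.ext_getElem
  · simp [length_dpOf]
  · intro i hi hi2
    rw [length_dpOf] at hi2
    rw [getElem_dpOf _ _ _ hi2]
    match i with
    | 0 =>
      rw [List.getElem_cons_zero, gsp]
      rw [if_neg (by omega), if_pos (by omega)]
      simp
    | k + 1 =>
      rw [List.getElem_cons_succ,
          List.getElem_map (h := by simp; omega),
          List.getElem_range]
      have hkM : k + 1 ≤ M := by simp at hi; omega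
      rw [take_dpOf v M (k+1) hkM]
      rw [gsp, if_neg (by omega), if_pos (by omega)]
      rw [Nat.cast_list_sum, List.map_map]
      apply congrArg List.sum
      apply List.map_congr_left
      intro j hj
      have hj' : j < k + 1 := List.mem_range.1 hj
      show ((gsp v j (M - 1 - j) : Nat) : Int) = ((gsp v j (k + 1 - 1 - j + (M + 1 - 1 - (k + 1))) : Nat) : Int)
      congr 2
      omega

theorem SLup {σ : Int} (hσ : σ > 0) (v : List Int) (M : Nat) :
    ((bScan (dpOf v M).reverse).2).reverse = dpOf (σ :: v) (M + 1) := by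
  rw [List.reverse_eq_iff, bScan_snd, List.length_reverse, length_dpOf]
  apply List.ext_getElem
  · simp [length_dpOf]
  · intro i hi hi2
    have hiM : i < M + 1 := by simpa using hi
    rw [List.getElem_reverse]
    have hlen2 : (dpOf (σ :: v) (M + 1)).length - 1 - i = M - i := by
      rw [length_dpOf]; omega
    simp only [hlen2]
    rw [getElem_dpOf _ _ _ (by omega)]
    rw [show M + 1 - 1 - (M - i) = i by omega]
    rw [gsp, if_pos (by omega)]
    match i with
    | 0 =>
      rw [List.getElem_cons_zero]
      simp
    | k + 1 =>
      rw [List.getElem_cons_succ,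
          List.getElem_map (h := by simp; omega),
          List.getElem_range,
          List.take_reverse, List.sum_reverse, length_dpOf]
      rw [drop_dpOf v M (M - (k + 1)) (by omega)]
      rw [show M - (M - (k + 1)) = k + 1 by omega]
      rw [Nat.cast_list_sum, List.map_map]
      apply congrArg List.sum
      apply List.map_congr_left
      intro j hj
      have hj' : j < k + 1 := List.mem_range.1 hj
      show ((gsp v (M - (k + 1) + j) (M - 1 - (M - (k + 1) + j)) : Nat) : Int)
          = ((gsp v (M - (k + 1) + j) (k + 1 - 1 - j) : Nat) : Int)
      congr 2
      omega

theorem bLoop_none : ∀ (u : List Int) (dp : List Int), (0 : Int) ∈ u → bLoop u dp = none := by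
  intro u
  induction u with
  | nil => intro dp h; simp at h
  | cons σ rest ih =>
    intro dp h
    rcases List.mem_cons.1 h with rfl | h'
    · rw [bLoop, if_pos rfl]
    · rw [bLoop]
      split_ifs <;> first | rfl | exact ih _ h'

theorem bLoop_ok : ∀ (u v : List Int) (M : Nat), (∀ σ ∈ u, σ ≠ 0) →
    bLoop u (dpOf v M) = some (dpOf (u.reverse ++ v) (M + u.length)) := by
  intro u
  induction u with
  | nil => intro v M _; simp [bLoop]
  | cons σ rest ih =>
    intro v M hz
    have hσ : σ ≠ 0 := hz σ List.mem_cons_self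
    rw [bLoop, if_neg hσ]
    rcases lt_trichotomy σ 0 with h | h | h
    · rw [if_neg (by omega), SLdown h v M,
          ih (σ :: v) (M + 1) (fun τ hτ => hz τ (List.mem_cons_of_mem _ hτ))]
      rw [List.reverse_cons, List.append_assoc]
      simp only [List.singleton_append, List.length_cons]
      rw [show M + 1 + rest.length = M + (rest.length + 1) by omega]
    · omega
    · rw [if_pos (by omega), SLup h v M,
          ih (σ :: v) (M + 1) (fun τ hτ => hz τ (List.mem_cons_of_mem _ hτ))]
      rw [List.reverse_cons, List.append_assoc]
      simp only [List.singleton_append, List.length_cons]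
      rw [show M + 1 + rest.length = M + (rest.length + 1) by omega]

theorem prodRange2 : ∀ (d : Nat),
    (PySem.List.pyRange 2 ((d : Int) + 2) 1).foldl (fun a k => a * k) 1 = ((d + 1).factorial : Int) := by
  intro d
  induction d with
  | zero =>
    rw [show ((0 : Nat) : Int) + 2 = 2 by norm_num, PySem.List.pyRange_one_eq_nil (by omega)]
    simp [Nat.factorial]
  | succ e ih =>
    rw [show ((e + 1 : Nat) : Int) + 2 = ((e : Int) + 2) + 1 by push_cast; ring,
        PySem.List.pyRange_one_succ_right (by omega),
        List.foldl_append, ih]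
    simp only [List.foldl_cons, List.foldl_nil]
    push_cast [Nat.factorial_succ]
    ring

theorem fact_prod (c : Int) (hc : 1 ≤ c) :
    (PySem.List.pyRange 2 c 1).foldl (fun a k => a * k) 1 = (((c - 1).toNat.factorial : Nat) : Int) := by
  rcases lt_or_ge c 2 with h | h
  · have hc1 : c = 1 := by omega
    subst hc1
    rw [PySem.List.pyRange_one_eq_nil (by omega)]
    simp
  · have : c = ((c - 2).toNat : Int) + 2 := by omega
    rw [this, prodRange2]
    congr 1
    congr 1
    omega

theorem Aval (n : Int) (s : List Int) (h1 : 2 ≤ n) (h2 : s ≠ [])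
    (hL : (s.length : Int) + 1 ≤ n) :
    compute_f n s
      = (((List.range n.toNat).map (fun j => gsp s j (n.toNat - 1 - j))).sum : Int) := by
  have hN : 2 ≤ n.toNat := by omega
  have hLN : s.length + 1 ≤ n.toNat := by omega
  rw [compute_f, if_neg (by omega), if_neg (by simp [h2])]
  set R := PySem.List.pyRange 1 (n + 1) 1 with hR
  have hRlen : R.length = n.toNat := by
    rw [hR, PySem.List.length_pyRange_one]
    omega
  have hmemR : ∀ x ∈ R, 1 ≤ x := by
    intro x hx
    exact (PySem.List.mem_pyRange_one.1 hx).1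
  rw [PySem.List.foldl_if_add_one (fun perm => checkA s perm 0), zero_add]
  have hcongr : (PySem.List.permutations R R.length).countP (fun p => checkA s p 0)
      = (PySem.List.permutations R R.length).countP (fun p => chk (1 :: s) 0 p) := by
    apply List.countP_congr
    intro p hp
    have hplen : p.length = R.length := PySem.List.length_of_mem_permutations hp
    have hsp : s.length < p.length := by omega
    rw [checkA_eq s.length s p 0 (by omega) hsp]
    match p, hplen with
    | x :: rest, hplen =>
      have hx : 1 ≤ x :=
        hmemR x (PySem.List.mem_of_mem_of_mem_permutations hp List.mem_cons_self)
      rw [chk]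
      simp only [List.drop_zero, List.getD_cons_zero, List.drop_succ_cons, List.drop_zero]
      have : decide ((1 : Int) * (x - 0) > 0) = true := by simp; omega
      rw [this, Bool.true_and]
  rw [hcongr]
  have hnd : R.Nodup := by rw [hR]; exact PySem.List.nodup_pyRange_one 1 (n + 1)
  have h0R : (0 : Int) ∉ R := by
    intro h
    have := (PySem.List.mem_pyRange_one.1 h).1
    omega
  rw [ML (1 :: s) 0 R hnd h0R]
  have c1 : R.countP (fun y => y < 0) = 0 := by
    apply List.countP_eq_zero.2
    intro y hy
    have := hmemR y hy
    simp; omega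
  have c2 : R.countP (fun y => (0 : Int) < y) = n.toNat := by
    rw [← hRlen]
    apply List.countP_eq_length.2
    intro y hy
    have := hmemR y hy
    simp; omega
  rw [c1, c2, gsp, if_pos (by norm_num)]
  congr 1
  apply congrArg List.sum
  apply List.map_congr_left
  intro j _
  rw [Nat.zero_add]

theorem Bval (n : Int) (s : List Int) (h1 : 2 ≤ n) (h2 : s ≠ [])
    (hL : (s.length : Int) + 1 ≤ n) :
    compute_f_alt n s
      = (((List.range n.toNat).map (fun j => gsp s j (n.toNat - 1 - j))).sum : Int) := by
  have hN : 2 ≤ n.toNat := by omega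
  have hLN : s.length + 1 ≤ n.toNat := by omega
  rw [compute_f_alt, if_neg (by rintro (h | h) <;> first | omega | exact absurd h h2), if_neg (by omega)]
  set M : Nat := (n - (s.length : Int)).toNat with hM
  have hM1 : 1 ≤ M := by omega
  have hML : M + s.length = n.toNat := by omega
  show (match bLoop s.reverse
      (List.replicate M ((PySem.List.pyRange 2 (n - s.length) 1).foldl (fun a k => a * k) 1)) with
    | none => 0
    | some dp => dp.sum) = _
  rw [fact_prod (n - s.length) (by omega)]
  have hrepl : List.replicate M (((n - (s.length : Int) - 1).toNat.factorial : Nat) : Int)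
      = dpOf [] M := by
    rw [dpOf]
    have : ∀ a ∈ List.range M, ((gsp [] a (M - 1 - a) : Nat) : Int)
        = (((n - (s.length : Int) - 1).toNat.factorial : Nat) : Int) := by
      intro a ha
      have ha' : a < M := List.mem_range.1 ha
      rw [gsp]
      congr 2
      omega
    rw [List.map_congr_left this, List.map_const', List.length_range]
  rw [hrepl]
  by_cases hz : (0 : Int) ∈ s
  · rw [bLoop_none s.reverse (dpOf [] M) (List.mem_reverse.2 hz)]
    show (0 : Int) = _
    have : ∀ j ∈ List.range n.toNat, gsp s j (n.toNat - 1 - j) = 0 := by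
      intro j _
      exact gsp_zero s _ _ hz
    rw [List.map_congr_left this]
    simp
  · rw [bLoop_ok s.reverse [] M (fun σ hσ hσ0 => hz (hσ0 ▸ List.mem_reverse.1 hσ))]
    show (dpOf (s.reverse.reverse ++ []) (M + s.reverse.length)).sum = _
    rw [List.reverse_reverse, List.append_nil, List.length_reverse, hML]
    rw [dpOf, Nat.cast_list_sum, List.map_map]
    rfl

theorem mainEq (n : Int) (s : List Int) (hpre : n ≤ 1 ∨ s = [] ∨ (s.length : Int) + 1 ≤ n) :
    compute_f n s = compute_f_alt n s := by
  by_cases h1 : n ≤ 1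
  · rw [compute_f, if_pos h1, compute_f_alt, if_pos (Or.inl h1)]
  · by_cases h2 : s = []
    · rw [compute_f, if_neg h1, if_pos (by simp [h2]), compute_f_alt, if_pos (Or.inr h2)]
    · have hL : (s.length : Int) + 1 ≤ n := by
        rcases hpre with h | h | h
        · exact absurd h h1
        · exact absurd h h2
        · exact h
      rw [Aval n s (by omega) h2 hL, Bval n s (by omega) h2 hL]


-- ===== VERDICT (by name: the statement is the Claim_ definition above) =====
theorem compute_f_spec : Claim_equal_compute_f := by
  intro n s _ hpre
  show compute_f n s = compute_f_alt n s
  exact mainEq n s hpre
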